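-- pv_equiv track=rewrite | github.com/ccpnmr/ccpnmodel | ccpncore/memops/metamodel/Util.py | compactStringList
-- ===== SOURCE A (Python) =====
-- def compactStringList(stringList, separator='', maxChars=80):
--   """ compact stringList into shorter list of longer strings,
--   each either made from a single start string, or no longer than maxChars
--
--   From previous breakString function.
--   Modified to speed up and add parameter defaults, Rasmus Fogh 28 Aug 2003
--   Modified to split into two functions
--   and to add separator to end of each line, Rasmus Fogh 12 Sep 03
--   Modified to separate string breaking from list modification
--   Rasmus Fogh 29/6/06
--   Modified to return single-element lists unchanged
--   Rasmus Fogh 29/6/06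
--   """
--
--   result = []
--
--   if not stringList:
--     return result
--   elif len(stringList) ==1:
--     return stringList[:]
--
--   seplength = len(separator)
--
--   nchars = len(stringList[0])
--   start=0
--   for n in range(1,len(stringList)):
--     i = len(stringList[n])
--     if nchars + i + (n-start)*seplength > maxChars:
--       result.append(separator.join(stringList[start:n] + ['']))
--       start = n
--       nchars = i
--     else:
--       nchars += i
--   result.append(separator.join(stringList[start:len(stringList)]))
--
--   return result
-- ===== SOURCE B (Python) =====
-- def compactStringList(stringList, separator='', maxChars=80):
--     # Prefix-sums + binary search: cum[j] = total length of the first j strings.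
--     # A group starting at `start` ends at the first index e where
--     # cum[e+1]-cum[start] + (e-start)*len(separator) > maxChars (the predicate is
--     # monotone in e since lengths are nonnegative), found by binary search.
--     if not stringList:
--         return []
--     if len(stringList) == 1:
--         return stringList[:]
--     n = len(stringList)
--     sep = len(separator)
--     cum = [0]
--     for s in stringList:
--         cum.append(cum[-1] + len(s))
--     lines = []
--     start = 0
--     while True:
--         lo, hi = start + 1, n
--         while lo < hi:
--             mid = (lo + hi) // 2
--             if cum[mid + 1] - cum[start] + (mid - start) * sep > maxChars:
--                 hi = mid
--             else:
--                 lo = mid + 1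
--         end = lo
--         if end == n:
--             lines.append(separator.join(stringList[start:]))
--             return lines
--         lines.append(separator.join(stringList[start:end]) + separator)
--         start = end
-- ===== Notes on version B (the rewrite author's own statement) =====
-- stated objective: alternative
-- what changed: B precomputes a prefix-sum array of string lengths and finds each line break by binary search on the monotone overflow predicate, instead of A's single linear scan that accumulates nchars and slices-and-joins inside the loop.
import Mathlib
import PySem

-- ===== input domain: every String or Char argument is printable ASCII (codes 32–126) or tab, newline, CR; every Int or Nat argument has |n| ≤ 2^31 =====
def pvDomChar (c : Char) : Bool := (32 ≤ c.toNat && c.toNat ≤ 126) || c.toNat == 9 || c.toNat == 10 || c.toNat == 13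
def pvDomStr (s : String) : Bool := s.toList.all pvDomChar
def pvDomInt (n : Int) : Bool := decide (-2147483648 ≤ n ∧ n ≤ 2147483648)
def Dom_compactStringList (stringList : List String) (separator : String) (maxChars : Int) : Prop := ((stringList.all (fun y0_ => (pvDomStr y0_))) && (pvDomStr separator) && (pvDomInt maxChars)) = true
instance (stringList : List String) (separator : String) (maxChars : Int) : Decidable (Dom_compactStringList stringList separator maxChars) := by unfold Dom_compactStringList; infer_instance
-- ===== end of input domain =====

-- B replaces A's linear scan-and-slice loop by prefix sums of the string lengths plus a
-- binary search (on the monotone overflow predicate) for each line break; same output.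

-- ===== PORT A =====
-- Literal port of A: fold over range(1, len) keeping (result, nchars, start),
-- appending separator.join(stringList[start:n] + ['']) on each break.
def compactStringList (stringList : List String) (separator : String) (maxChars : Int) : List String :=
  if stringList = [] then []
  else if stringList.length = 1 then stringList
  else
    let seplength : Int := PySem.Str.len separator
    let st0 : List String × Int × Int := ([], PySem.Str.len (PySem.List.pyGetD stringList 0 ""), 0)
    let st := (PySem.List.pyRange 1 (PySem.List.len stringList) 1).foldl
      (fun (st : List String × Int × Int) n =>
        let i := PySem.Str.len (PySem.List.pyGetD stringList n "")
        if st.2.1 + i + (n - st.2.2) * seplength > maxChars then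
          (st.1 ++ [PySem.Str.join separator (PySem.List.slice stringList (some st.2.2) (some n) ++ [""])], i, n)
        else
          (st.1, st.2.1 + i, st.2.2)) st0
    st.1 ++ [PySem.Str.join separator (PySem.List.slice stringList (some st.2.2) (some (PySem.List.len stringList)))]

-- ===== PORT B =====
-- Literal port of B (Source B): prefix-sum list cum (python 'for s in stringList: cum.append(cum[-1]+len(s))'),
-- then repeatedly binary-search the line break (inner while lo < hi) and emit the line (outer while True).
def pvCum (stringList : List String) : List Int :=
  stringList.foldl (fun cum s => cum ++ [PySem.List.pyGetD cum (-1) 0 + PySem.Str.len s]) [0]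

-- inner 'while lo < hi' loop of Source B (fuel = hi - lo is a totality guard only; it never runs out)
def pvBsearchF (cum : List Int) (sep maxChars : Int) (start : Nat) : Nat → Nat → Nat → Nat
  | 0, lo, _ => lo
  | fuel + 1, lo, hi =>
    if lo < hi then
      let mid := (lo + hi) / 2
      if PySem.List.pyGetD cum ((mid : Int) + 1) 0 - PySem.List.pyGetD cum (start : Int) 0 + ((mid : Int) - (start : Int)) * sep > maxChars then
        pvBsearchF cum sep maxChars start fuel lo mid
      else
        pvBsearchF cum sep maxChars start fuel (mid + 1) hi
    else lo

def pvBsearch (cum : List Int) (sep maxChars : Int) (start lo hi : Nat) : Nat :=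
  pvBsearchF cum sep maxChars start (hi - lo) lo hi

-- outer 'while True' loop of Source B (fuel = n - start is a totality guard only; 'n ≤ e' is python's 'end == n')
def pvGoF (stringList : List String) (separator : String) (maxChars : Int) (cum : List Int) (sep : Int) (n : Nat) : Nat → Nat → List String
  | 0, _ => []
  | fuel + 1, start =>
    let e := pvBsearch cum sep maxChars start (start + 1) n
    if n ≤ e then
      [PySem.Str.join separator (PySem.List.slice stringList (some (start : Int)) none)]
    else
      (PySem.Str.join separator (PySem.List.slice stringList (some (start : Int)) (some (e : Int))) ++ separator)
        :: pvGoF stringList separator maxChars cum sep n fuel e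

def compactStringList_alt (stringList : List String) (separator : String) (maxChars : Int) : List String :=
  match stringList with
  | [] => []
  | [s] => [s]
  | _ =>
    let n := stringList.length
    let sep := PySem.Str.len separator
    let cum := pvCum stringList
    pvGoF stringList separator maxChars cum sep n n 0

-- ===== PRECONDITION & SPEC =====
def Spec_compactStringList (stringList : List String) (separator : String) (maxChars : Int) (out : List String) : Prop := out = compactStringList_alt stringList separator maxChars
instance (stringList : List String) (separator : String) (maxChars : Int) (out : List String) : Decidable (Spec_compactStringList stringList separator maxChars out) := by unfold Spec_compactStringList; infer_instance

-- ===== CLAIM (what is proved, stated in full; the proofs are below) =====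
def Claim_equal_compactStringList : Prop := ∀ (stringList : List String) (separator : String) (maxChars : Int), Dom_compactStringList stringList separator maxChars → Spec_compactStringList stringList separator maxChars (compactStringList stringList separator maxChars)

-- ===== LEMMAS AND PROOFS =====

-- sum of the lengths of the first j strings
def pvSumLen (xs : List String) (j : Nat) : Int := ((xs.take j).map PySem.Str.len).sum

theorem pvGetD_append_last (l : List Int) (c : Int) :
    PySem.List.pyGetD (l ++ [c]) (-1) 0 = c := by
  simp [PySem.List.pyGetD, PySem.List.pyGet?, PySem.List.pyIdx?]

theorem pvCum_fold (xs : List String) :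
    ∀ (acc : List Int) (c : Int),
      xs.foldl (fun cum s => cum ++ [PySem.List.pyGetD cum (-1) 0 + PySem.Str.len s]) (acc ++ [c])
        = acc ++ List.scanl (fun a s => a + PySem.Str.len s) c xs := by
  induction xs with
  | nil => intro acc c; simp [List.scanl]
  | cons s t ih =>
      intro acc c
      simp only [List.foldl_cons, List.scanl]
      rw [pvGetD_append_last]
      have h := ih (acc ++ [c]) (c + PySem.Str.len s)
      simpa [List.append_assoc] using h

theorem pvCum_eq_scanl (xs : List String) :
    pvCum xs = List.scanl (fun a s => a + PySem.Str.len s) 0 xs := by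
  have h := pvCum_fold xs [] 0
  simpa [pvCum] using h

theorem scanl_getD (L : String → Int) (xs : List String) :
    ∀ (c : Int) (j : Nat), j ≤ xs.length →
      (List.scanl (fun a s => a + L s) c xs).getD j 0 = c + ((xs.take j).map L).sum := by
  induction xs with
  | nil =>
      intro c j hj
      have : j = 0 := by simpa using hj
      subst this
      simp [List.scanl]
  | cons s t ih =>
      intro c j hj
      cases j with
      | zero => simp [List.scanl]
      | succ j' =>
          rw [List.scanl_cons, List.getD_cons_succ, ih (c + L s) j' (by simpa using hj)]
          simp only [List.take_succ_cons, List.map_cons, List.sum_cons]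
          ring

theorem pvCum_getD (xs : List String) (j : Nat) (hj : j ≤ xs.length) :
    PySem.List.pyGetD (pvCum xs) ((j : Nat) : Int) 0 = pvSumLen xs j := by
  rw [PySem.List.pyGetD_natCast, pvCum_eq_scanl, pvSumLen,
    scanl_getD PySem.Str.len xs 0 j hj, zero_add]

theorem strLen_nonneg (s : String) : 0 ≤ PySem.Str.len s := by
  simp [PySem.Str.len_eq]

theorem pvSumLen_mono (xs : List String) {a b : Nat} (h : a ≤ b) :
    pvSumLen xs a ≤ pvSumLen xs b := by
  unfold pvSumLen
  have hpre : (xs.take a).map PySem.Str.len <+: (xs.take b).map PySem.Str.len :=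
    (List.take_prefix_take_left h).map _
  obtain ⟨rest, hrest⟩ := hpre
  rw [← hrest, List.sum_append]
  have : 0 ≤ rest.sum := by
    apply List.sum_nonneg
    intro x hx
    have hx' : x ∈ (xs.take b).map PySem.Str.len := by rw [← hrest]; exact List.mem_append_right _ hx
    obtain ⟨s, _, rfl⟩ := List.mem_map.mp hx'
    exact strLen_nonneg s
  omega

theorem pvSumLen_succ (xs : List String) (j : Nat) (hj : j < xs.length) :
    pvSumLen xs (j + 1) = pvSumLen xs j + PySem.Str.len xs[j] := by
  unfold pvSumLen
  rw [List.take_add_one]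
  simp [hj]

-- the overflow predicate B binary-searches and A tests linearly
def pvQ (xs : List String) (sep maxChars : Int) (start j : Nat) : Prop :=
  pvSumLen xs (j + 1) - pvSumLen xs start + ((j : Int) - (start : Int)) * sep > maxChars

theorem pvQ_mono (xs : List String) (sep maxChars : Int) (hsep : 0 ≤ sep) (start : Nat)
    {i j : Nat} (hij : i ≤ j) (h : pvQ xs sep maxChars start i) : pvQ xs sep maxChars start j := by
  unfold pvQ at h ⊢
  have h1 : pvSumLen xs (i + 1) ≤ pvSumLen xs (j + 1) := pvSumLen_mono xs (by omega)
  have h2 : ((i : Int) - (start : Int)) * sep ≤ ((j : Int) - (start : Int)) * sep := by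
    apply mul_le_mul_of_nonneg_right _ hsep
    have : (i : Int) ≤ (j : Int) := by exact_mod_cast hij
    omega
  omega

-- binary-search correctness (fuel version): first j ≥ lo with pvQ j (or hi)
theorem pvBsearchF_spec (xs : List String) (sep maxChars : Int) (hsep : 0 ≤ sep) (start : Nat)
    (hstart : start ≤ xs.length) :
    ∀ (fuel lo hi : Nat), hi - lo ≤ fuel → lo ≤ hi → hi ≤ xs.length →
      let r := pvBsearchF (pvCum xs) sep maxChars start fuel lo hi
      lo ≤ r ∧ r ≤ hi ∧ (∀ m, lo ≤ m → m < r → ¬ pvQ xs sep maxChars start m) ∧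
        (r < hi → pvQ xs sep maxChars start r) := by
  intro fuel
  induction fuel with
  | zero =>
      intro lo hi hfuel hlohi hhi
      have : lo = hi := by omega
      subst this
      simp only [pvBsearchF]
      exact ⟨le_refl _, le_refl _, by omega, by omega⟩
  | succ fuel ih =>
      intro lo hi hfuel hlohi hhi
      by_cases hlt : lo < hi
      · simp only [pvBsearchF, if_pos hlt]
        set mid := (lo + hi) / 2 with hmid
        have hmidlo : lo ≤ mid := by omega
        have hmidlt : mid < hi := by omega
        have hmid1 : mid + 1 ≤ xs.length := by omega
        have e1 : PySem.List.pyGetD (pvCum xs) ((mid : Int) + 1) 0 = pvSumLen xs (mid + 1) := by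
          rw [show ((mid : Int) + 1) = (((mid + 1 : Nat) : Nat) : Int) by push_cast; ring]
          exact pvCum_getD xs (mid + 1) hmid1
        have e2 : PySem.List.pyGetD (pvCum xs) ((start : Nat) : Int) 0 = pvSumLen xs start :=
          pvCum_getD xs start hstart
        by_cases hcond : PySem.List.pyGetD (pvCum xs) ((mid : Int) + 1) 0
            - PySem.List.pyGetD (pvCum xs) (start : Int) 0 + ((mid : Int) - (start : Int)) * sep > maxChars
        · rw [if_pos hcond]
          have hQmid : pvQ xs sep maxChars start mid := by
            unfold pvQ
            rw [e1, e2] at hcond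
            omega
          obtain ⟨h1, h2, h3, h4⟩ := ih lo mid (by omega) (by omega) (by omega)
          refine ⟨h1, by omega, h3, ?_⟩
          intro hr
          by_cases hrm : pvBsearchF (pvCum xs) sep maxChars start fuel lo mid < mid
          · exact h4 hrm
          · have : pvBsearchF (pvCum xs) sep maxChars start fuel lo mid = mid := by omega
            rw [this]; exact hQmid
        · rw [if_neg hcond]
          have hnQmid : ¬ pvQ xs sep maxChars start mid := by
            unfold pvQ
            rw [e1, e2] at hcond
            omega
          obtain ⟨h1, h2, h3, h4⟩ := ih (mid + 1) hi (by omega) (by omega) hhi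
          refine ⟨by omega, h2, ?_, h4⟩
          intro m hm hmr hQm
          by_cases hmm : m ≤ mid
          · exact hnQmid (pvQ_mono xs sep maxChars hsep start hmm hQm)
          · exact h3 m (by omega) hmr hQm
      · simp only [pvBsearchF, if_neg hlt]
        exact ⟨le_refl _, by omega, by omega, by omega⟩

theorem pvBsearch_spec (xs : List String) (sep maxChars : Int) (hsep : 0 ≤ sep) (start : Nat)
    (hstart : start ≤ xs.length) (lo hi : Nat) (hlohi : lo ≤ hi) (hhi : hi ≤ xs.length) :
    let r := pvBsearch (pvCum xs) sep maxChars start lo hi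
    lo ≤ r ∧ r ≤ hi ∧ (∀ m, lo ≤ m → m < r → ¬ pvQ xs sep maxChars start m) ∧
      (r < hi → pvQ xs sep maxChars start r) :=
  pvBsearchF_spec xs sep maxChars hsep start hstart (hi - lo) lo hi (le_refl _) hlohi hhi

-- separator.join(g + ['']) = separator.join(g) + separator for nonempty g (List Char level)
theorem chars_join_concat_empty (sep p : List Char) (g : List (List Char)) :
    PySem.Chars.join sep ((p :: g) ++ [[]]) = PySem.Chars.join sep (p :: g) ++ sep := by
  induction g generalizing p with
  | nil =>
      simp [PySem.Chars.join_cons_cons, PySem.Chars.join_singleton]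
  | cons q g' ih =>
      have h1 : PySem.Chars.join sep ((p :: q :: g') ++ [[]])
          = p ++ sep ++ PySem.Chars.join sep ((q :: g') ++ [[]]) := by
        simpa using PySem.Chars.join_cons_cons sep p q (g' ++ [[]])
      rw [h1, ih, PySem.Chars.join_cons_cons]
      simp [List.append_assoc]

-- the same at the String level
theorem str_join_concat_empty (sep p : String) (g : List String) :
    PySem.Str.join sep ((p :: g) ++ [""]) = PySem.Str.join sep (p :: g) ++ sep := by
  have h : (PySem.Str.join sep ((p :: g) ++ [""])).toList
      = (PySem.Str.join sep (p :: g) ++ sep).toList := by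
    simp only [PySem.Str.toList_join, String.toList_append, List.map_append, List.map_cons,
      List.map_nil]
    simpa using chars_join_concat_empty sep.toList p.toList (g.map String.toList)
  have := congrArg String.ofList h
  simpa [PySem.Str.join] using this

-- A's fold step, abbreviated for the lemmas below
def pvStepA (xs : List String) (sepS : String) (mc : Int) (st : List String × Int × Int) (n : Int) :
    List String × Int × Int :=
  let i := PySem.Str.len (PySem.List.pyGetD xs n "")
  if st.2.1 + i + (n - st.2.2) * (PySem.Str.len sepS) > mc then
    (st.1 ++ [PySem.Str.join sepS (PySem.List.slice xs (some st.2.2) (some n) ++ [""])], i, n)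
  else
    (st.1, st.2.1 + i, st.2.2)

theorem pvGetD_of_lt (xs : List String) (k : Nat) (hk : k < xs.length) :
    PySem.List.pyGetD xs ((k : Nat) : Int) "" = xs[k] := by
  rw [PySem.List.pyGetD_natCast]
  simp [List.getD, hk]

-- linear scan over [k, e) with no break: only nchars accumulates
theorem pvScan_to (xs : List String) (sepS : String) (mc : Int) (start e : Nat)
    (he : e ≤ xs.length)
    (hnoQ : ∀ m, start + 1 ≤ m → m < e → ¬ pvQ xs (PySem.Str.len sepS) mc start m) :
    ∀ (d k : Nat) (res : List String), start < k → k + d = e →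
      (PySem.List.pyRange ((k : Nat) : Int) (PySem.List.len xs) 1).foldl (pvStepA xs sepS mc)
          (res, pvSumLen xs k - pvSumLen xs start, (start : Int))
        = (PySem.List.pyRange ((e : Nat) : Int) (PySem.List.len xs) 1).foldl (pvStepA xs sepS mc)
          (res, pvSumLen xs e - pvSumLen xs start, (start : Int)) := by
  intro d
  induction d with
  | zero =>
      intro k res _ hke
      have : k = e := by omega
      rw [this]
  | succ d ih =>
      intro k res hk hke
      have hkl : k < xs.length := by omega
      have hcons : PySem.List.pyRange ((k : Nat) : Int) (PySem.List.len xs) 1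
          = ((k : Nat) : Int) :: PySem.List.pyRange (((k : Nat) : Int) + 1) (PySem.List.len xs) 1 := by
        rw [PySem.List.len_eq]
        exact PySem.List.pyRange_one_cons (by exact_mod_cast hkl)
      rw [hcons, List.foldl_cons]
      have hstep : pvStepA xs sepS mc (res, pvSumLen xs k - pvSumLen xs start, (start : Int)) ((k : Nat) : Int)
          = (res, pvSumLen xs (k + 1) - pvSumLen xs start, (start : Int)) := by
        unfold pvStepA
        rw [pvGetD_of_lt xs k hkl]
        have hcond : ¬ (pvSumLen xs k - pvSumLen xs start + PySem.Str.len xs[k]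
            + (((k : Nat) : Int) - (start : Int)) * PySem.Str.len sepS > mc) := by
          have := hnoQ k (by omega) (by omega)
          unfold pvQ at this
          rw [pvSumLen_succ xs k hkl] at this
          omega
        simp only [hcond, if_false]
        rw [pvSumLen_succ xs k hkl]
        simp [add_sub_right_comm]
      rw [hstep]
      have hcast : ((k : Nat) : Int) + 1 = (((k + 1 : Nat) : Nat) : Int) := by push_cast; ring
      rw [hcast]
      exact ih (k + 1) res (by omega) (by omega)

-- main loop correspondence: A's fold-and-final from position start equals res ++ B's pvGoF from start
theorem pvGo_eq (xs : List String) (sepS : String) (mc : Int) :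
    ∀ (fuel start : Nat) (res : List String), xs.length - start ≤ fuel → start < xs.length →
      (let st := (PySem.List.pyRange (((start + 1 : Nat) : Nat) : Int) (PySem.List.len xs) 1).foldl
          (pvStepA xs sepS mc)
          (res, pvSumLen xs (start + 1) - pvSumLen xs start, (start : Int))
       st.1 ++ [PySem.Str.join sepS (PySem.List.slice xs (some st.2.2) (some (PySem.List.len xs)))])
      = res ++ pvGoF xs sepS mc (pvCum xs) (PySem.Str.len sepS) xs.length fuel start := by
  intro fuel
  induction fuel with
  | zero => intro start res hf hs; omega
  | succ fuel ih =>
      intro start res hf hs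
      have hsep : (0 : Int) ≤ PySem.Str.len sepS := strLen_nonneg sepS
      obtain ⟨hlo, hhi, hnoQ, hQ⟩ := pvBsearch_spec xs (PySem.Str.len sepS) mc hsep start
        (le_of_lt hs) (start + 1) xs.length (by omega) (le_refl _)
      simp only [pvGoF]
      set e := pvBsearch (pvCum xs) (PySem.Str.len sepS) mc start (start + 1) xs.length with he
      have hscan := pvScan_to xs sepS mc start e hhi (fun m h1 h2 => hnoQ m h1 h2)
        (e - (start + 1)) (start + 1) res (by omega) (by omega)
      by_cases hcase : xs.length ≤ e
      · have hee : e = xs.length := by omega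
        rw [if_pos hcase, hscan]
        have hnil : PySem.List.pyRange ((e : Nat) : Int) (PySem.List.len xs) 1 = [] := by
          rw [PySem.List.len_eq, hee]
          exact PySem.List.pyRange_one_eq_nil (le_refl _)
        rw [hnil, List.foldl_nil]
        show _ ++ _ = _
        have hslice : PySem.List.slice xs (some ((start : Nat) : Int)) (some (PySem.List.len xs))
            = PySem.List.slice xs (some ((start : Nat) : Int)) none := by
          rw [PySem.List.len_eq, PySem.List.slice_natCast, PySem.List.slice_from_natCast]
          exact List.take_of_length_le (by simp)
        rw [hslice]
      · have helt : e < xs.length := by omega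
        have hQe := hQ helt
        rw [if_neg hcase, hscan]
        have hcons : PySem.List.pyRange ((e : Nat) : Int) (PySem.List.len xs) 1
            = ((e : Nat) : Int) :: PySem.List.pyRange (((e : Nat) : Int) + 1) (PySem.List.len xs) 1 := by
          rw [PySem.List.len_eq]
          exact PySem.List.pyRange_one_cons (by exact_mod_cast helt)
        rw [hcons, List.foldl_cons]
        have hstep : pvStepA xs sepS mc (res, pvSumLen xs e - pvSumLen xs start, (start : Int)) ((e : Nat) : Int)
            = (res ++ [PySem.Str.join sepS (PySem.List.slice xs (some ((start : Nat) : Int)) (some ((e : Nat) : Int)) ++ [""])],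
               pvSumLen xs (e + 1) - pvSumLen xs e, ((e : Nat) : Int)) := by
          unfold pvStepA
          rw [pvGetD_of_lt xs e helt]
          have hcond : pvSumLen xs e - pvSumLen xs start + PySem.Str.len xs[e]
              + (((e : Nat) : Int) - (start : Int)) * PySem.Str.len sepS > mc := by
            unfold pvQ at hQe
            rw [pvSumLen_succ xs e helt] at hQe
            omega
          simp only [hcond, if_true]
          rw [pvSumLen_succ xs e helt]
          simp
        rw [hstep]
        have hcast : ((e : Nat) : Int) + 1 = (((e + 1 : Nat) : Nat) : Int) := by push_cast; ring
        rw [hcast]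
        have := ih e (res ++ [PySem.Str.join sepS (PySem.List.slice xs (some ((start : Nat) : Int)) (some ((e : Nat) : Int)) ++ [""])])
          (by omega) helt
        rw [this]
        -- rewrite the emitted line: join(slice ++ ['']) = join(slice) ++ sepS
        have hlen : (PySem.List.slice xs (some ((start : Nat) : Int)) (some ((e : Nat) : Int))).length
            = e - start := by
          rw [PySem.List.slice_natCast]
          simp
          omega
        have hne : PySem.List.slice xs (some ((start : Nat) : Int)) (some ((e : Nat) : Int)) ≠ [] := by
          intro hnil
          rw [hnil] at hlen
          simp at hlen
          omega
        obtain ⟨p, g, hpg⟩ := List.exists_cons_of_ne_nil hne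
        rw [hpg, str_join_concat_empty sepS p g, ← hpg]
        simp [List.append_assoc]

-- ===== VERDICT (by name: the statement is the Claim_ definition above) =====
theorem compactStringList_spec : Claim_equal_compactStringList := by
  intro xs sepS mc _
  unfold Spec_compactStringList
  match xs with
  | [] => rfl
  | [s] => rfl
  | s0 :: s1 :: t =>
    unfold compactStringList compactStringList_alt
    simp only [List.cons_ne_nil, if_false, List.length_cons]
    rw [if_neg (by omega)]
    have h := pvGo_eq (s0 :: s1 :: t) sepS mc (s0 :: s1 :: t).length 0 [] (by omega) (by simp)
    have e1 : pvSumLen (s0 :: s1 :: t) (0 + 1) - pvSumLen (s0 :: s1 :: t) 0 = PySem.Str.len s0 := by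
      simp [pvSumLen]
    rw [e1] at h
    have e2 : (((0 + 1 : Nat) : Nat) : Int) = 1 := by norm_num
    rw [e2] at h
    have e3 : (((0 : Nat) : Nat) : Int) = 0 := by norm_num
    rw [e3] at h
    have hg : PySem.List.pyGetD (s0 :: s1 :: t) (0 : Int) "" = s0 := by
      have h0' : (0 : Int) ≤ (t.length : Int) + 1 := by positivity
      simp [PySem.List.pyGetD, PySem.List.pyGet?, PySem.List.pyIdx?, h0']
    rw [hg]
    simpa using h
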